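-- pv_equiv track=rewrite | github.com/cybertronai/sutro | compare_reuse_distance.py | gf2_flops_and_reads
-- ===== SOURCE A (Python) =====
-- def gf2_flops_and_reads(n, m):
--     """FLOPs and reads for GF(2) solve on m×n system (analytical worst-case)."""
--     row_len = n + 1
--     k = min(n, m)  # number of pivots
--
--     # Conversion: m*n adds + m*n divs + m adds + m divs
--     conv_flops = 2*m*n + 2*m
--     conv_reads = m*n + m  # read x_input + y_input
--
--     # Build augmented: read A + b
--     build_reads = m*n + m
--
--     # Gaussian elimination
--     elim_flops = 0
--     elim_reads = 0
--     for col in range(k):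
--         rows_left = m - col
--         elim_reads += rows_left          # pivot scan (column)
--         elim_reads += m                  # elimination scan (column)
--         elim_flops += rows_left + m      # comparisons
--         # Avg rows eliminated per column ≈ m/2 (rough)
--         avg_elim = max(1, m // 2)
--         elim_reads += avg_elim * 2 * row_len  # read pivot + target rows
--         elim_flops += avg_elim * row_len       # XOR operations
--         # Row swap (sometimes)
--         elim_reads += 2 * row_len
--
--     # Back-substitution
--     backsub_reads = k * row_len
--     backsub_flops = k
--
--     # Verification (on test data, counted separately)
--     total_flops = conv_flops + elim_flops + backsub_flops
--     total_reads = conv_reads + build_reads + elim_reads + backsub_reads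
--     return total_flops, total_reads
-- ===== SOURCE B (Python) =====
-- def gf2_flops_and_reads(n, m):
--     """FLOPs and reads for GF(2) solve on m x n system, closed form (no loop)."""
--     row_len = n + 1
--     k = min(n, m)
--     base_flops = 2*m*n + 2*m
--     base_reads = 2*(m*n + m)
--     if k > 0:
--         # sum over col in range(k) of (m - col), plus the per-column constants
--         scan = k*m - k*(k-1)//2
--         avg = max(1, m // 2)
--         elim_flops = scan + k*m + k*avg*row_len
--         elim_reads = scan + k*m + 2*k*avg*row_len + 2*k*row_len
--     else:
--         elim_flops = 0
--         elim_reads = 0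
--     return base_flops + elim_flops + k, base_reads + elim_reads + k*row_len
-- ===== Notes on version B (the rewrite author's own statement) =====
-- stated objective: faster
-- what changed: Replaced the per-column Gaussian-elimination counting loop (O(min(n,m)) iterations) by a closed-form arithmetic-series formula for the summed counters, computed in O(1).
import Mathlib
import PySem

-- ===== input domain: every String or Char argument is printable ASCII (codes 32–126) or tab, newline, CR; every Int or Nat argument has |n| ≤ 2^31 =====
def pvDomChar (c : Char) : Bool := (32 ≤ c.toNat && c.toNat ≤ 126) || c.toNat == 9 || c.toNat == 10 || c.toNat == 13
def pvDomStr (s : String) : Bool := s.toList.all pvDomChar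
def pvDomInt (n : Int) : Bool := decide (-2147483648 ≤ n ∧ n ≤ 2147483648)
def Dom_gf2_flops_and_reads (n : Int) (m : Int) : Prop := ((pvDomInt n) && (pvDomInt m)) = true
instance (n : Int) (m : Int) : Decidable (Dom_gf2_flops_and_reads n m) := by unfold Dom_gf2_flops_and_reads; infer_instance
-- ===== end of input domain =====

-- B replaces A's per-column elimination loop by a closed-form arithmetic-series sum (O(1) vs O(min(n,m))).
-- The Python returns a tuple (flops, reads); both ports return it as a two-element list.

-- ===== PORT A =====
def gf2_flops_and_reads (n : Int) (m : Int) : List Int :=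
  let row_len := n + 1
  let k := min n m
  let conv_flops := 2*m*n + 2*m
  let conv_reads := m*n + m
  let build_reads := m*n + m
  let s :=
    (PySem.List.pyRange 0 k 1).foldl
      (fun (s : Int × Int) col =>
        (s.1 + (m - col + m) + max 1 (PySem.Int.floordiv m 2) * row_len,
         s.2 + (m - col) + m + max 1 (PySem.Int.floordiv m 2) * 2 * row_len + 2 * row_len))
      (0, 0)
  let backsub_reads := k * row_len
  let backsub_flops := k
  [conv_flops + s.1 + backsub_flops,
   conv_reads + build_reads + s.2 + backsub_reads]

-- ===== PORT B =====
def gf2_flops_and_reads_alt (n : Int) (m : Int) : List Int :=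
  let row_len := n + 1
  let k := min n m
  let base_flops := 2*m*n + 2*m
  let base_reads := 2*(m*n + m)
  let p : Int × Int :=
    if 0 < k then
      let scan := k*m - PySem.Int.floordiv (k*(k-1)) 2
      let avg := max 1 (PySem.Int.floordiv m 2)
      (scan + k*m + k*avg*row_len,
       scan + k*m + 2*k*avg*row_len + 2*k*row_len)
    else (0, 0)
  [base_flops + p.1 + k, base_reads + p.2 + k*row_len]

-- ===== PRECONDITION & SPEC =====
def Spec_gf2_flops_and_reads (n : Int) (m : Int) (out : List Int) : Prop := out = gf2_flops_and_reads_alt n m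
instance (n : Int) (m : Int) (out : List Int) : Decidable (Spec_gf2_flops_and_reads n m out) := by unfold Spec_gf2_flops_and_reads; infer_instance

-- ===== CLAIM (what is proved, stated in full; the proofs are below) =====
def Claim_equal_gf2_flops_and_reads : Prop := ∀ (n : Int) (m : Int), Dom_gf2_flops_and_reads n m → Spec_gf2_flops_and_reads n m (gf2_flops_and_reads n m)

-- ===== LEMMAS AND PROOFS =====

-- triangular number x*(x-1)/2 (proof-side helper)
def pvTri (x : Int) : Int := x * (x - 1) / 2

theorem pvTri_succ (x : Int) : pvTri (x + 1) = pvTri x + x := by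
  obtain ⟨s, hs⟩ := Int.even_mul_succ_self (x - 1)
  have h1 : x * (x - 1) = 2 * s := by linarith [hs]
  unfold pvTri
  have h2 : (x + 1) * (x + 1 - 1) = 2 * (s + x) := by linarith [hs]
  rw [h1, h2, Int.mul_ediv_cancel_left _ (by norm_num), Int.mul_ediv_cancel_left _ (by norm_num)]

theorem pvElimLoop (m rl g : Int) (t : Nat) :
    (PySem.List.pyRange 0 (t : Int) 1).foldl
      (fun (s : Int × Int) col =>
        (s.1 + (m - col + m) + g * rl,
         s.2 + (m - col) + m + g * 2 * rl + 2 * rl)) (0, 0)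
    = ((t : Int) * (2*m) - pvTri t + (t : Int) * (g * rl),
       (t : Int) * (2*m) - pvTri t + (t : Int) * (g * 2 * rl) + (t : Int) * (2 * rl)) := by
  induction t with
  | zero => simp [PySem.List.pyRange_one_eq_nil, pvTri]
  | succ t ih =>
    have h : ((t + 1 : Nat) : Int) = (t : Int) + 1 := by push_cast; ring
    rw [h, PySem.List.pyRange_one_succ_right (by positivity), List.foldl_append, ih]
    simp only [List.foldl_cons, List.foldl_nil, pvTri_succ, Prod.mk.injEq]
    constructor <;> ring

theorem gf2_flops_and_reads_spec : Claim_equal_gf2_flops_and_reads := by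
  intro n m _
  unfold Spec_gf2_flops_and_reads gf2_flops_and_reads gf2_flops_and_reads_alt
  dsimp only
  by_cases hk : 0 < min n m
  · have ht : ((min n m).toNat : Int) = min n m := Int.toNat_of_nonneg (le_of_lt hk)
    rw [if_pos hk, ← ht, pvElimLoop]
    have hfd : PySem.Int.floordiv (((min n m).toNat : Int) * (((min n m).toNat : Int) - 1)) 2
        = pvTri ((min n m).toNat : Int) := by
      rw [PySem.Int.floordiv_eq_ediv_of_pos (by norm_num : (0:Int) < 2)]; rfl
    rw [hfd]
    simp only [List.cons.injEq, and_true]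
    constructor <;> ring
  · rw [if_neg hk, PySem.List.pyRange_one_eq_nil (by omega)]
    simp only [List.foldl_nil, List.cons.injEq, and_true]
    refine ⟨?_, ?_⟩
    · trivial
    · ring
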